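-- pv_equiv track=rewrite | github.com/ChurikovAnatolii/dds_parser | main.py | prepare_channels_values
-- ===== SOURCE A (Python) =====
-- def prepare_channels_values(channel_dict):
--
--     def_dict_channels = {'ID': 0, 'Enable': 0, 'DisplayName': 'NULL', 'Description': "NULL", 'DirectionType': 1,
--                          'ThroughputAlarmLevel': 0, 'InactivityTimeOut': 0, 'ThroughputCapacityBPS': 0,
--                          'Type': "NULL", 'StreamFormat': "NULL", 'GroupID': 0, 'Mode': 0, 'LocalAddr': "NULL",
--                          'LocalPort': 0, 'TTL': 0, 'DestinationAddr': "NO", 'DestinationPort': "NULL",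
--                          'IpStSourceName': "NULL", 'IpStMulticastAddr': "NULL", 'IpStInterfaces': "NULL",
--                          'DisableAlarm': "NULL", 'ReconnectTimeOut': "NULL", 'EnableKeepAlive': "TEXT",
--                          'KeepAliveTime': 0, 'KeepAliveInterval': 0, 'KeepAliveProbes': 0, 'FMTPLocalID': "NULL",
--                          'FMTPRemoteID': "NULL", 'Ti': 0, 'Tr': 0, 'Ts': 0}
--     for name in def_dict_channels.keys():
--         def_dict_channels[name] = channel_dict.get(name)
--     return def_dict_channels
-- ===== SOURCE B (Python) =====
-- def prepare_channels_values(channel_dict):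
--     fixed_keys = ('ID', 'Enable', 'DisplayName', 'Description', 'DirectionType',
--                   'ThroughputAlarmLevel', 'InactivityTimeOut', 'ThroughputCapacityBPS',
--                   'Type', 'StreamFormat', 'GroupID', 'Mode', 'LocalAddr',
--                   'LocalPort', 'TTL', 'DestinationAddr', 'DestinationPort',
--                   'IpStSourceName', 'IpStMulticastAddr', 'IpStInterfaces',
--                   'DisableAlarm', 'ReconnectTimeOut', 'EnableKeepAlive',
--                   'KeepAliveTime', 'KeepAliveInterval', 'KeepAliveProbes',
--                   'FMTPLocalID', 'FMTPRemoteID', 'Ti', 'Tr', 'Ts')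
--     key_set = frozenset(fixed_keys)
--     result = dict.fromkeys(fixed_keys)
--     for k, v in channel_dict.items():
--         if k in key_set:
--             result[k] = v
--     return result
-- ===== Notes on version B (the rewrite author's own statement) =====
-- stated objective: alternative
-- what changed: A scans the 31 fixed keys and does a per-key lookup into channel_dict; B initialises all fixed keys to None with dict.fromkeys and instead makes one pass over channel_dict's items, keeping those whose key is in the fixed-key set.
import Mathlib
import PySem

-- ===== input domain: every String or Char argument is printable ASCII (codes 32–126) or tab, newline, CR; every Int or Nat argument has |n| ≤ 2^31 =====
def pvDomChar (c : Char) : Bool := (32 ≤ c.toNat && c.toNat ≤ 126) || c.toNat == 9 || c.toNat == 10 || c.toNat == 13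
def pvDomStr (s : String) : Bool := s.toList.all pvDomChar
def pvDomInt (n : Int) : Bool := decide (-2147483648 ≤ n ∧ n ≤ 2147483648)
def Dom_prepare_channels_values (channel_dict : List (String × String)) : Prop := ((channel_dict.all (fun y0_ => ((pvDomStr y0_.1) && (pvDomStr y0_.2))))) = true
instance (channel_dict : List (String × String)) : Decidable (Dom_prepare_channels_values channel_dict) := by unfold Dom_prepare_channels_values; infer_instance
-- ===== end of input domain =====

-- B inverts the traversal: instead of scanning the 31 fixed keys and doing a per-key lookup
-- into channel_dict (A), B initialises all fixed keys to None once and makes a single pass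
-- over channel_dict's items, keeping those whose key is a fixed key (objective: alternative).


-- ===== PORT A =====
-- Default value of A's literal dict: an int or a string
inductive PcvDefV where
  | i : Int → PcvDefV
  | s : String → PcvDefV
deriving DecidableEq, Repr

-- A's literal default dict, in insertion order
def pcvDefDictChannels : PySem.Dict String PcvDefV := PySem.Dict.mk
  [("ID", .i 0), ("Enable", .i 0), ("DisplayName", .s "NULL"), ("Description", .s "NULL"),
   ("DirectionType", .i 1), ("ThroughputAlarmLevel", .i 0), ("InactivityTimeOut", .i 0),
   ("ThroughputCapacityBPS", .i 0), ("Type", .s "NULL"), ("StreamFormat", .s "NULL"),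
   ("GroupID", .i 0), ("Mode", .i 0), ("LocalAddr", .s "NULL"), ("LocalPort", .i 0),
   ("TTL", .i 0), ("DestinationAddr", .s "NO"), ("DestinationPort", .s "NULL"),
   ("IpStSourceName", .s "NULL"), ("IpStMulticastAddr", .s "NULL"), ("IpStInterfaces", .s "NULL"),
   ("DisableAlarm", .s "NULL"), ("ReconnectTimeOut", .s "NULL"), ("EnableKeepAlive", .s "TEXT"),
   ("KeepAliveTime", .i 0), ("KeepAliveInterval", .i 0), ("KeepAliveProbes", .i 0),
   ("FMTPLocalID", .s "NULL"), ("FMTPRemoteID", .s "NULL"), ("Ti", .i 0), ("Tr", .i 0), ("Ts", .i 0)]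

-- 'for name in def_dict_channels.keys(): def_dict_channels[name] = channel_dict.get(name)':
-- the in-place assignments change the value type (int/str → Optional[str]) and hit every key
-- once in key order, so the mutated dict is modelled by inserting, in that same loop over the
-- keys, channel_dict.get(name) into a dict of the new value type (keys/order identical).
def prepare_channels_values (channel_dict : List (String × String)) : List (String × Option String) :=
  let d :=
    (PySem.Dict.keys pcvDefDictChannels).foldl
      (fun (acc : PySem.Dict String (Option String)) name =>
        acc.insert name ((PySem.Dict.mk channel_dict).get? name))
      PySem.Dict.empty
  d.items

-- ===== PORT B =====
def pcvFixedKeys : List String :=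
  ["ID", "Enable", "DisplayName", "Description", "DirectionType",
   "ThroughputAlarmLevel", "InactivityTimeOut", "ThroughputCapacityBPS",
   "Type", "StreamFormat", "GroupID", "Mode", "LocalAddr",
   "LocalPort", "TTL", "DestinationAddr", "DestinationPort",
   "IpStSourceName", "IpStMulticastAddr", "IpStInterfaces",
   "DisableAlarm", "ReconnectTimeOut", "EnableKeepAlive",
   "KeepAliveTime", "KeepAliveInterval", "KeepAliveProbes",
   "FMTPLocalID", "FMTPRemoteID", "Ti", "Tr", "Ts"]

def prepare_channels_values_alt (channel_dict : List (String × String)) : List (String × Option String) :=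
  let key_set : PySem.Set String := PySem.Set.ofList pcvFixedKeys
  let result0 : PySem.Dict String (Option String) :=
    PySem.Dict.mk (pcvFixedKeys.map (fun k => (k, (none : Option String))))  -- dict.fromkeys
  let result :=
    channel_dict.foldl
      (fun (acc : PySem.Dict String (Option String)) kv =>
        if key_set.contains kv.1 then acc.insert kv.1 (some kv.2) else acc)
      result0
  result.items

-- ===== PRECONDITION & SPEC =====
-- Pre_ excludes association lists with duplicate keys: they cannot arise from a Python dict
-- (the argument is a dict, whose keys are unique), and on them the assoc-list model's
-- behaviour (A: first match per key; B: last match per key) is accidental.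
def Pre_prepare_channels_values (channel_dict : List (String × String)) : Prop :=
  (channel_dict.map Prod.fst).Nodup
instance (channel_dict : List (String × String)) : Decidable (Pre_prepare_channels_values channel_dict) := by unfold Pre_prepare_channels_values; infer_instance

def pvWitness_prepare_channels_values : (List (String × String)) := [("ID", "5"), ("Bogus", "x")]

def Spec_prepare_channels_values (channel_dict : List (String × String)) (out : List (String × Option String)) : Prop := out = prepare_channels_values_alt channel_dict
instance (channel_dict : List (String × String)) (out : List (String × Option String)) : Decidable (Spec_prepare_channels_values channel_dict out) := by unfold Spec_prepare_channels_values; infer_instance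

-- ===== CLAIM (what is proved, stated in full; the proofs are below) =====
def Claim_equal_prepare_channels_values : Prop := ∀ (channel_dict : List (String × String)), Dom_prepare_channels_values channel_dict → Pre_prepare_channels_values channel_dict → Spec_prepare_channels_values channel_dict (prepare_channels_values channel_dict)

-- ===== LEMMAS AND PROOFS =====

theorem pcv_keys_nodup : pcvFixedKeys.Nodup := by decide

theorem pcv_keys_eq : PySem.Dict.keys pcvDefDictChannels = pcvFixedKeys := by decide

-- A's loop inserts fresh distinct keys into an empty dict: the items are the keys paired
-- with their looked-up values.
theorem A_items (cd : List (String × String)) :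
    prepare_channels_values cd
      = pcvFixedKeys.map (fun k => (k, (PySem.Dict.mk cd).get? k)) := by
  unfold prepare_channels_values
  rw [pcv_keys_eq]
  have h := PySem.Dict.items_foldl_insert_fresh (l := pcvFixedKeys)
    (d := (PySem.Dict.empty : PySem.Dict String (Option String)))
    (k := fun name => name) (v := fun name => (PySem.Dict.mk cd).get? name)
    (by intro a _; simp [pysem]) (by simpa using pcv_keys_nodup)
  simpa using h

-- One step of B's loop on a dict whose items are pcvFixedKeys.map (k, g k).
theorem B_step (g : String → Option String) (k0 : String) (v0 : String) :
    (if (PySem.Set.ofList pcvFixedKeys).contains k0 then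
        (PySem.Dict.mk (pcvFixedKeys.map (fun k => (k, g k)))).insert k0 (some v0)
      else PySem.Dict.mk (pcvFixedKeys.map (fun k => (k, g k))))
      = PySem.Dict.mk (pcvFixedKeys.map
          (fun k => (k, if k = k0 ∧ k0 ∈ pcvFixedKeys then some v0 else g k))) := by
  by_cases hmem : k0 ∈ pcvFixedKeys
  · have hcontains : (PySem.Set.ofList pcvFixedKeys).contains k0 = true := by
      simp [PySem.Set.contains, PySem.Set.mem_ofList, hmem]
    rw [if_pos hcontains]
    have hc : (PySem.Dict.mk (pcvFixedKeys.map (fun k => (k, g k)))).contains k0 = true := by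
      simp [PySem.Dict.contains_mk, hmem]
    apply PySem.Dict.ext
    rw [PySem.Dict.items_insert_of_contains _ _ hc]
    simp only [List.map_map]
    apply List.map_congr_left
    intro k _
    by_cases hk : k = k0 <;> simp [hk, hmem]
  · have hcontains : (PySem.Set.ofList pcvFixedKeys).contains k0 = false := by
      simp [PySem.Set.contains, PySem.Set.mem_ofList, hmem]
    rw [if_neg (by simp [PySem.Set.contains, PySem.Set.mem_ofList, hmem])]
    congr 1
    apply List.map_congr_left
    intro k _
    simp [hmem]

-- The final value of key k under B's loop, threaded as a function update.
theorem B_loop (cd : List (String × String)) (g : String → Option String) :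
    cd.foldl
      (fun (acc : PySem.Dict String (Option String)) kv =>
        if (PySem.Set.ofList pcvFixedKeys).contains kv.1 then acc.insert kv.1 (some kv.2) else acc)
      (PySem.Dict.mk (pcvFixedKeys.map (fun k => (k, g k))))
    = PySem.Dict.mk (pcvFixedKeys.map (fun k =>
        (k, cd.foldl (fun w kv => if k = kv.1 ∧ kv.1 ∈ pcvFixedKeys then some kv.2 else w) (g k)))) := by
  induction cd generalizing g with
  | nil => simp
  | cons p t ih =>
    simp only [List.foldl_cons]
    rw [B_step g p.1 p.2, ih]

-- With no duplicate keys in cd, the threaded last-write value of a fixed key equals the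
-- first-match lookup.
theorem fold_eq_get? (cd : List (String × String)) (hnd : (cd.map Prod.fst).Nodup)
    (k : String) (hk : k ∈ pcvFixedKeys) (g : Option String) :
    cd.foldl (fun w kv => if k = kv.1 ∧ kv.1 ∈ pcvFixedKeys then some kv.2 else w) g
      = ((PySem.Dict.mk cd).get? k).elim g some := by
  induction cd generalizing g with
  | nil => simp [PySem.Dict.get?]
  | cons p t ih =>
    simp only [List.map_cons, List.nodup_cons] at hnd
    simp only [List.foldl_cons]
    rw [ih hnd.2, PySem.Dict.get?_mk_cons]
    by_cases hpk : p.1 = k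
    · subst hpk
      have hnone : (PySem.Dict.mk t).get? p.1 = none := by
        rw [PySem.Dict.get?_eq_none_iff_not_mem_keys]
        simpa [PySem.Dict.keys] using hnd.1
      simp [hnone, hk]
    · simp [hpk, Ne.symm hpk]

-- ===== VERDICT (by name: the statement is the Claim_ definition above) =====
theorem prepare_channels_values_spec : Claim_equal_prepare_channels_values := by
  intro cd _ hpre
  unfold Spec_prepare_channels_values
  rw [A_items]
  unfold prepare_channels_values_alt
  simp only []
  rw [B_loop]
  show List.map (fun k => (k, (PySem.Dict.mk cd).get? k)) pcvFixedKeys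
      = List.map (fun k =>
          (k, List.foldl (fun w kv => if k = kv.1 ∧ kv.1 ∈ pcvFixedKeys then some kv.2 else w) none cd))
        pcvFixedKeys
  apply List.map_congr_left
  intro k hk
  rw [fold_eq_get? cd hpre k hk]
  cases (PySem.Dict.mk cd).get? k <;> rfl
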